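-- pv_equiv track=rewrite | github.com/ksh4030/coding-test | 프로그래머스/0/181855. 문자열 묶기/문자열 묶기.py | solution
-- ===== SOURCE A (Python) =====
-- def solution(strArr):
--     answer = 0
--     arr = []
--     m = 0
--
--     for s in strArr :
--         m = max(len(s), m)
--
--     for i in range(m+1) :
--         arr.append(0)
--
--     for s in strArr :
--         arr[len(s)] += 1
--
--     return max(arr)
-- ===== SOURCE B (Python) =====
-- def solution(strArr):
--     lengths = sorted(len(s) for s in strArr)
--     best = 0
--     run = 0
--     prev = None
--     for x in lengths:
--         if x == prev:
--             run += 1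
--         else:
--             run = 1
--             prev = x
--         if run > best:
--             best = run
--     return best
-- ===== Notes on version B (the rewrite author's own statement) =====
-- stated objective: alternative
-- what changed: Replaces A's counting-sort buckets (max-length pass, O(m) zero array, tally pass, max over the array) with sort-then-scan: sort the lengths and return the longest run of equal adjacent values in one linear scan, with no frequency table at all.
import Mathlib
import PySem

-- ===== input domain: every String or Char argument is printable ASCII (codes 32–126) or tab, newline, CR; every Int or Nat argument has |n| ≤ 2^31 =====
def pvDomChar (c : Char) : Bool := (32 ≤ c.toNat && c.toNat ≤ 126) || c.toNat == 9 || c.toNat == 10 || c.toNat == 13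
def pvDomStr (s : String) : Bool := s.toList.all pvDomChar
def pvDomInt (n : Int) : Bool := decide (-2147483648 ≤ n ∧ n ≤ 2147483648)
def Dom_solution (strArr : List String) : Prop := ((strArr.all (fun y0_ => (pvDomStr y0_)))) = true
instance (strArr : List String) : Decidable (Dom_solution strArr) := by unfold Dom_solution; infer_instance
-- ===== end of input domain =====

-- B: sort the string lengths and return the longest run of equal adjacent values in one scan,
-- instead of A's counting buckets (max-length pass, zero array, tally pass, max over the array).


-- ===== PORT A =====
def solution (strArr : List String) : Int :=
  let m := strArr.foldl (fun m s => max (PySem.Str.len s) m) 0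
  let arr := (PySem.List.pyRange 0 (m + 1) 1).foldl (fun a _ => a ++ [(0 : Int)]) ([] : List Int)
  let arr2 := strArr.foldl
    (fun a s => PySem.List.pySetD a (PySem.Str.len s) (PySem.List.pyGetD a (PySem.Str.len s) 0 + 1)) arr
  -- max(arr): arr always has m + 1 ≥ 1 entries, so Python's max never sees an empty list
  (PySem.List.max? arr2 (fun v => v)).getD 0

-- ===== PORT B =====
-- loop body of Source B: state = (best, run, prev)
def pvStep (st : Int × Int × Option Int) (x : Int) : Int × Int × Option Int :=
  let run := if st.2.2 = some x then st.2.1 + 1 else 1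
  (max st.1 run, run, some x)

def solution_alt (strArr : List String) : Int :=
  let lengths := PySem.List.sorted (strArr.map (fun s => PySem.Str.len s)) (fun x => x) false
  (lengths.foldl pvStep ((0 : Int), (0 : Int), (none : Option Int))).1

-- ===== PRECONDITION & SPEC =====
def Spec_solution (strArr : List String) (out : Int) : Prop := out = solution_alt strArr
instance (strArr : List String) (out : Int) : Decidable (Spec_solution strArr out) := by unfold Spec_solution; infer_instance

-- ===== CLAIM (what is proved, stated in full; the proofs are below) =====
def Claim_equal_solution : Prop := ∀ (strArr : List String), Dom_solution strArr → Spec_solution strArr (solution strArr)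

-- ===== LEMMAS AND PROOFS =====

theorem pvLen_nonneg (s : String) : 0 ≤ PySem.Str.len s := by
  simp [PySem.Str.len_eq]

-- the append-0 loop builds a replicate
theorem pvBuild (l : List Int) (init : List Int) :
    l.foldl (fun a _ => a ++ [(0 : Int)]) init = init ++ List.replicate l.length 0 := by
  induction l generalizing init with
  | nil => simp
  | cons x t ih =>
    rw [List.foldl_cons, ih, List.length_cons, List.replicate_succ]
    simp

-- the counting loop preserves the array length
theorem pvCountLen (xs : List Int) : ∀ (a : List Int),
    (xs.foldl (fun a x => PySem.List.pySetD a x (PySem.List.pyGetD a x 0 + 1)) a).length = a.length := by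
  induction xs with
  | nil => intro a; rfl
  | cons x t ih => intro a; rw [List.foldl_cons, ih, PySem.List.length_pySetD]

-- the counting loop: every entry becomes old entry + count of its index among the values
theorem pvCount (xs : List Int) : ∀ (a : List Int),
    (∀ x ∈ xs, 0 ≤ x ∧ x < (a.length : Int)) →
    ∀ (j : Nat), j < a.length →
    (xs.foldl (fun a x => PySem.List.pySetD a x (PySem.List.pyGetD a x 0 + 1)) a)[j]?
      = some (a.getD j 0 + (xs.count (j : Int) : Int)) := by
  induction xs with
  | nil =>
    intro a _ j hj
    simp [List.getD_eq_getElem?_getD, List.getElem?_eq_getElem hj]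
  | cons x t ih =>
    intro a hmem j hj
    obtain ⟨hx0, hxlt⟩ := hmem x List.mem_cons_self
    have hxn : x.toNat < a.length := by omega
    have hset : PySem.List.pySetD a x (PySem.List.pyGetD a x 0 + 1)
        = a.set x.toNat (a[x.toNat] + 1) := by
      rw [PySem.List.pySetD_of_nonneg a _ hx0, PySem.List.pyGetD_eq_getElem a 0 hx0 hxlt]
    have hlen' : (a.set x.toNat (a[x.toNat] + 1)).length = a.length := by simp
    have ih' := ih (a.set x.toNat (a[x.toNat] + 1))
      (by intro y hy; have := hmem y (List.mem_cons_of_mem _ hy); omega)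
      j (by omega)
    rw [List.foldl_cons, hset, ih']
    have hgetD : (a.set x.toNat (a[x.toNat] + 1)).getD j 0
        = if x.toNat = j then a[x.toNat] + 1 else a.getD j 0 := by
      rw [List.getD_eq_getElem?_getD, List.getElem?_set]
      by_cases h : x.toNat = j
      · subst h; simp [hxn]
      · simp [h, List.getD_eq_getElem?_getD]
    rw [hgetD]
    by_cases hje : x.toNat = j
    · have hbeq : (x == (j : Int)) = true := by simp; omega
      have hjx : a.getD j 0 = a[x.toNat] := by
        rw [List.getD_eq_getElem?_getD, ← hje, List.getElem?_eq_getElem hxn, Option.getD_some]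
      rw [if_pos hje, hjx, List.count_cons, hbeq]
      simp only [if_true, Option.some.injEq]
      push_cast
      ring
    · have hbeq : (x == (j : Int)) = false := by simp; omega
      simp [hje, List.count_cons, hbeq]

-- appending a different element does not change a count
theorem pvCountAppendNe (k x : Int) (l : List Int) (h : ¬k = x) :
    (l ++ [x]).count k = l.count k := by
  have h0 : List.count k [x] = 0 := by
    rw [List.count_eq_zero]
    simp
    omega
  rw [List.count_append, h0]
  omega

-- B's scan over a sorted list: the state is (longest run so far, current run, last element);
-- on a sorted list the current run is the full count of the last element, and the best is the max count
theorem pvRuns (l : List Int) (hs : l.Pairwise (· ≤ ·)) (hne : l ≠ []) :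
    ∃ b t, l.foldl pvStep ((0 : Int), (0 : Int), (none : Option Int)) = (b, (l.count t : Int), some t)
      ∧ t ∈ l ∧ (∀ y ∈ l, y ≤ t)
      ∧ (∀ k ∈ l, (l.count k : Int) ≤ b) ∧ ∃ k ∈ l, b = (l.count k : Int) := by
  induction l using List.reverseRecOn with
  | nil => exact absurd rfl hne
  | append_singleton l x ih =>
    rw [List.pairwise_append] at hs
    obtain ⟨hl, -, hax⟩ := hs
    have hax' : ∀ a ∈ l, a ≤ x := fun a ha => hax a ha x (by simp)
    rw [List.foldl_append]
    by_cases hE : l = []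
    · subst hE
      refine ⟨1, x, ?_, by simp, by simp, ?_, x, by simp, by simp⟩
      · simp [pvStep]
      · intro k hk
        simp at hk
        subst hk
        simp
    · obtain ⟨b, t, heq, htmem, htmax, hub, k₀, hk₀, hbk⟩ := ih hl hE
      rw [heq]
      by_cases hxt : x = t
      · subst hxt
        have hcnt : ((l ++ [x]).count x : Int) = (l.count x : Int) + 1 := by
          have : (l ++ [x]).count x = l.count x + 1 := by simp
          rw [this]; push_cast; ring
        refine ⟨max b ((l.count x : Int) + 1), x, ?_, by simp, ?_, ?_, ?_⟩
        · rw [hcnt]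
          simp [pvStep]
        · intro y hy
          rcases List.mem_append.1 hy with h | h
          · exact hax' y h
          · simp at h; omega
        · intro k hk
          rcases List.mem_append.1 hk with h | h
          · by_cases hkx : k = x
            · subst hkx; rw [hcnt]; exact le_max_right _ _
            · rw [pvCountAppendNe k x l hkx]
              exact le_trans (hub k h) (le_max_left _ _)
          · simp at h; subst h; rw [hcnt]; exact le_max_right _ _
        · rcases le_total b ((l.count x : Int) + 1) with hle | hle
          · refine ⟨x, by simp, ?_⟩
            rw [hcnt, max_eq_right hle]
          · have hk₀x : k₀ ≠ x := by
              intro h; subst h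
              omega
            refine ⟨k₀, List.mem_append_left _ hk₀, ?_⟩
            rw [max_eq_left hle, pvCountAppendNe k₀ x l hk₀x, hbk]
      · -- x differs from the running value: x is strictly above everything in l, so x ∉ l
        have hxnot : x ∉ l := fun hxl => hxt (le_antisymm (htmax x hxl) (hax' t htmem))
        have hprev : (some t : Option Int) ≠ some x := by
          intro h; exact hxt (Option.some.inj h).symm
        have hcnt1 : ((l ++ [x]).count x : Int) = 1 := by
          rw [List.count_append, List.count_eq_zero.2 hxnot]; simp
        have hb1 : 1 ≤ b := by
          have : 1 ≤ l.count k₀ := List.count_pos_iff.2 hk₀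
          omega
        refine ⟨max b 1, x, ?_, by simp, ?_, ?_, ?_⟩
        · rw [hcnt1]
          simp [pvStep, hprev]
        · intro y hy
          rcases List.mem_append.1 hy with h | h
          · exact hax' y h
          · simp at h; omega
        · intro k hk
          rcases List.mem_append.1 hk with h | h
          · have hkx : k ≠ x := fun he => hxnot (he ▸ h)
            rw [pvCountAppendNe k x l hkx]
            exact le_trans (hub k h) (le_max_left _ _)
          · simp at h; subst h; rw [hcnt1]; exact le_max_right _ _
        · have hk₀x : k₀ ≠ x := fun he => hxnot (he ▸ hk₀)
          refine ⟨k₀, List.mem_append_left _ hk₀, ?_⟩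
          rw [max_eq_left hb1, pvCountAppendNe k₀ x l hk₀x, hbk]

-- ===== VERDICT =====
theorem solution_spec : Claim_equal_solution := by
  intro strArr _
  unfold Spec_solution solution solution_alt
  by_cases hE : strArr = []
  · subst hE; decide
  simp only []
  set L : List Int := strArr.map (fun s => PySem.Str.len s) with hL
  have hmfold : strArr.foldl (fun m s => max (PySem.Str.len s) m) 0
      = L.foldl (fun m x => max m x) 0 := by
    rw [hL, List.foldl_map]
    congr 1
    funext a s
    exact max_comm _ _
  set m : Int := L.foldl (fun m x => max m x) 0 with hm
  have hmax := PySem.List.le_foldl_max L (0 : Int)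
  have hm0 : 0 ≤ m := hmax.1
  have hub : ∀ x ∈ L, x ≤ m := hmax.2
  have hbuild : (PySem.List.pyRange 0 (m + 1) 1).foldl (fun a _ => a ++ [(0 : Int)]) ([] : List Int)
      = List.replicate (m + 1).toNat (0 : Int) := by
    rw [pvBuild, PySem.List.length_pyRange_one]
    simp
  have hLpos : ∀ x ∈ L, 0 ≤ x := by
    intro x hx
    rw [hL] at hx
    obtain ⟨s, _, rfl⟩ := List.mem_map.1 hx
    exact pvLen_nonneg s
  have hcfold : strArr.foldl
      (fun a s => PySem.List.pySetD a (PySem.Str.len s) (PySem.List.pyGetD a (PySem.Str.len s) 0 + 1))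
      (List.replicate (m + 1).toNat (0 : Int))
      = L.foldl (fun a x => PySem.List.pySetD a x (PySem.List.pyGetD a x 0 + 1))
        (List.replicate (m + 1).toNat (0 : Int)) := by
    rw [hL, List.foldl_map]
  rw [hmfold, hbuild, hcfold]
  set arr2 : List Int := L.foldl (fun a x => PySem.List.pySetD a x (PySem.List.pyGetD a x 0 + 1))
      (List.replicate (m + 1).toNat (0 : Int)) with harr2
  have hside : ∀ x ∈ L, 0 ≤ x ∧ x < ((List.replicate (m + 1).toNat (0 : Int)).length : Int) := by
    intro x hx
    have h1 := hLpos x hx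
    have h2 := hub x hx
    simp only [List.length_replicate]
    omega
  have hlen2 : arr2.length = (m + 1).toNat := by
    rw [harr2, pvCountLen, List.length_replicate]
  have hentry : ∀ (j : Nat), j < arr2.length → ∀ (hj : j < arr2.length),
      arr2[j]'hj = (L.count (j : Int) : Int) := by
    intro j hjl hj
    have hj' : j < (List.replicate (m + 1).toNat (0 : Int)).length := by
      simp only [List.length_replicate]; omega
    have h := pvCount L (List.replicate (m + 1).toNat (0 : Int)) hside j hj'
    rw [← harr2] at h
    rw [List.getElem?_eq_getElem hj] at h
    have hd : (List.replicate (m + 1).toNat (0 : Int)).getD j 0 = 0 :=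
      List.getD_replicate 0 (by simpa using hj')
    rw [hd] at h
    have := Option.some.inj h
    omega
  -- A's max(arr2) exists
  have harr2ne : arr2 ≠ [] := by
    intro h
    have h2 := hlen2
    rw [h] at h2
    simp at h2
    omega
  obtain ⟨vA, hvA⟩ : ∃ v, PySem.List.max? arr2 (fun v => v) = some v := by
    cases h : PySem.List.max? arr2 (fun v => v) with
    | none => exact absurd ((PySem.List.max?_eq_none_iff _ _).1 h) harr2ne
    | some v => exact ⟨v, rfl⟩
  have hvAmem := PySem.List.max?_mem hvA
  have hvAmax := PySem.List.max?_isMax hvA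
  rw [hvA]
  simp only [Option.getD_some]
  -- B's sorted scan
  have hLne : L ≠ [] := by simp [hL, hE]
  set L' : List Int := PySem.List.sorted L (fun x => x) false with hL'
  have hperm : L'.Perm L := PySem.List.sorted_perm L (fun x => x) false
  have hL'ne : L' ≠ [] := by
    intro h
    exact hLne ((PySem.List.sorted_eq_nil_iff _ _ _).1 (hL' ▸ h))
  have hpw : L'.Pairwise (· ≤ ·) := by
    simpa using PySem.List.sorted_pairwise L (fun x => x)
  obtain ⟨b, t, heq, htmem, -, hubB, k₀, hk₀, hbk⟩ := pvRuns L' hpw hL'ne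
  have hcnteq : ∀ k : Int, L'.count k = L.count k := fun k => hperm.count_eq k
  rw [heq]
  -- antisymmetry
  have h1 : vA ≤ b := by
    obtain ⟨j, hj, hje⟩ := List.mem_iff_getElem.1 hvAmem
    rw [hentry j hj hj] at hje
    by_cases hmemj : ((j : Int)) ∈ L
    · have : ((j : Int)) ∈ L' := hperm.mem_iff.2 hmemj
      have := hubB _ this
      rw [hcnteq] at this
      omega
    · have hc0 : L.count ((j : Int)) = 0 := List.count_eq_zero.2 hmemj
      rw [hc0] at hje
      have hb0 : 0 ≤ b := by
        rw [hbk]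
        positivity
      omega
  have h2 : b ≤ vA := by
    have hk₀L : k₀ ∈ L := hperm.mem_iff.1 hk₀
    have hk0 : 0 ≤ k₀ := hLpos k₀ hk₀L
    have hkm : k₀ ≤ m := hub k₀ hk₀L
    have hkn : k₀.toNat < arr2.length := by omega
    have hkcast : ((k₀.toNat : Int)) = k₀ := by omega
    have hkv : arr2[k₀.toNat]'hkn = (L.count k₀ : Int) := by
      rw [hentry k₀.toNat hkn hkn, hkcast]
    have hmem : ((L.count k₀ : Nat) : Int) ∈ arr2 := by
      rw [← hkv]
      exact List.getElem_mem _
    have := hvAmax _ hmem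
    rw [hbk, hcnteq]
    exact this
  omega
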